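-- pv_equiv track=rewrite | github.com/LittleBlBb/Interpreted-Programming-Languages | August's_game.py | august_answer
-- ===== SOURCE A (Python) =====
-- def delete_item(b_array, a_array):
--     for item in b_array:
--         if item in a_array:
--             a_array.remove(item)
--     return a_array
--
-- def set_array(b_array, a_array):
--     a_array.clear()
--     for item in b_array:
--         a_array.append(item)
--     return a_array
--
-- def august_answer(b_array, a_array):
--     c = 0
--     for item in b_array:
--         if item in a_array:
--             c += 1
--     if c <= len(a_array) / 2:
--         delete_item(b_array, a_array)
--         return False
--     else:
--         b_array_copy = b_array[:]
--         for item in b_array_copy: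
--             if item not in a_array:
--                 b_array.remove(item)
--         set_array(b_array, a_array)
--         return True
-- ===== SOURCE B (Python) =====
-- def make_counter(xs):
--     bc = {}
--     for x in xs:
--         bc[x] = bc.get(x, 0) + 1
--     return bc
--
-- def august_answer(b_array, a_array):
--     # Count overlap from the *other* side: a counting dict over b_array queried
--     # at the distinct elements of a_array, instead of scanning a_array per item.
--     # Same return value and same final contents of the two lists as the original.
--     bc = make_counter(b_array)
--     distinct_a = list(dict.fromkeys(a_array))
--     c = sum(bc.get(d, 0) for d in distinct_a)
--     if 2 * c > len(a_array):
--         a_set = set(distinct_a)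
--         filtered = [x for x in b_array if x in a_set]
--         b_array[:] = filtered
--         a_array[:] = list(filtered)
--         return True
--     else:
--         new_a = []
--         for x in a_array:
--             if bc.get(x, 0) > 0:
--                 bc[x] -= 1
--             else:
--                 new_a.append(x)
--         a_array[:] = new_a
--         return False
-- ===== Notes on version B (the rewrite author's own statement) =====
-- stated objective: faster
-- what changed: Counts the overlap from the opposite side: one counting dict over b_array queried at the distinct elements of a_array (and hash-driven single passes for the mutations), instead of a per-item list-membership scan of a_array for every element of b_array and list.remove loops.
import Mathlib
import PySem

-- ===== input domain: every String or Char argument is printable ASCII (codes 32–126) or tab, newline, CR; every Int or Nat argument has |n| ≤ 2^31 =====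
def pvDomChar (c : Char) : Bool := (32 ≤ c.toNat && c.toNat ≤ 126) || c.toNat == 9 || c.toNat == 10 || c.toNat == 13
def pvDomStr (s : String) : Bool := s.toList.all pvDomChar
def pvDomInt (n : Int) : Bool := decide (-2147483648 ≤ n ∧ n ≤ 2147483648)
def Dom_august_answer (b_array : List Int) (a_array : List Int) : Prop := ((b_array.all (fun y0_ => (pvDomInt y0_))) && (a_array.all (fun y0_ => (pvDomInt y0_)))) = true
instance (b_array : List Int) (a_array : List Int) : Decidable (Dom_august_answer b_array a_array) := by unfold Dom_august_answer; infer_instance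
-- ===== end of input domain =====

-- B counts the overlap with a counting dict over b_array queried at the distinct
-- elements of a_array instead of A's per-item list scans; the theorems are about
-- the RETURN value only (both Pythons also mutate the lists, and B reproduces
-- those mutations, but that is outside the ported signature).

-- ===== PORT A =====
-- c = 0; for item in b_array: if item in a_array: c += 1
-- 'c <= len(a_array) / 2' (true division, exact integers) is ported as 2*c ≤ len.
-- The post-decision mutation loops (delete_item / set_array) do not affect the
-- returned Bool, which is all the Lean signature carries.
def august_answer (b_array : List Int) (a_array : List Int) : Bool :=
  let c : Int := b_array.foldl (fun c item => if a_array.contains item then c + 1 else c) 0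
  if 2 * c ≤ (a_array.length : Int) then false else true

-- ===== PORT B =====
-- make_counter(xs): bc = {}; for x in xs: bc[x] = bc.get(x, 0) + 1; return bc
def make_counter (xs : List Int) : PySem.Dict Int Int :=
  xs.foldl (fun bc x => bc.insert x (bc.getD x 0 + 1)) PySem.Dict.empty

-- bc = make_counter(b_array); distinct_a = list(dict.fromkeys(a_array));
-- c = sum(bc.get(d, 0) for d in distinct_a); return 2 * c > len(a_array)
-- (the post-decision hash-driven mutation passes do not affect the returned Bool)
def august_answer_alt (b_array : List Int) (a_array : List Int) : Bool :=
  let bc : PySem.Dict Int Int := make_counter b_array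
  let distinct_a : List Int := PySem.Set.ofList a_array
  let c : Int := distinct_a.foldl (fun s d => s + bc.getD d 0) 0
  if 2 * c > (a_array.length : Int) then true else false

-- ===== PRECONDITION & SPEC =====
def Spec_august_answer (b_array : List Int) (a_array : List Int) (out : Bool) : Prop := out = august_answer_alt b_array a_array
instance (b_array : List Int) (a_array : List Int) (out : Bool) : Decidable (Spec_august_answer b_array a_array out) := by unfold Spec_august_answer; infer_instance

-- ===== CLAIM =====
def Claim_equal_august_answer : Prop := ∀ (b_array : List Int) (a_array : List Int), Dom_august_answer b_array a_array → Spec_august_answer b_array a_array (august_answer b_array a_array)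

-- ===== LEMMAS AND PROOFS =====

-- a conditional-count foldl is the sum of 0/1 indicators
theorem pv_foldl_count (l : List Int) (p : Int → Bool) (c : Int) :
    l.foldl (fun c x => if p x then c + 1 else c) c
      = c + (l.map (fun x => if p x then (1 : Int) else 0)).sum := by
  induction l generalizing c with
  | nil => simp
  | cons y l ih => simp [List.foldl_cons, ih]; split <;> ring

-- an additive foldl is the sum of the mapped list
theorem pv_foldl_sum (l : List Int) (f : Int → Int) (c : Int) :
    l.foldl (fun s d => s + f d) c = c + (l.map f).sum := by
  induction l generalizing c with
  | nil => simp
  | cons y l ih => simp [List.foldl_cons, ih]; ring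

theorem pv_sum_indicator_zero (l : List Int) (x : Int) (h : x ∉ l) :
    (l.map (fun d => if d = x then (1 : Int) else 0)).sum = 0 := by
  induction l with
  | nil => simp
  | cons y l ih =>
    simp only [List.mem_cons, not_or] at h
    simp [Ne.symm h.1, ih h.2]

theorem pv_sum_indicator (l : List Int) (x : Int) (h : l.Nodup) :
    (l.map (fun d => if d = x then (1 : Int) else 0)).sum
      = if x ∈ l then 1 else 0 := by
  induction l with
  | nil => simp
  | cons y l ih =>
    simp only [List.nodup_cons] at h
    by_cases hyx : y = x
    · subst hyx
      simp [pv_sum_indicator_zero l y h.1]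
    · simp [hyx, ih h.2, Ne.symm hyx]

-- the sum of b-counts over a nodup list equals the indicator count over b
theorem pv_count_swap (b : List Int) (da : List Int) (h : da.Nodup) :
    (da.map (fun d => ((b.count d : Int)))).sum
      = (b.map (fun x => if da.contains x then (1 : Int) else 0)).sum := by
  induction b with
  | nil => simp
  | cons x b ih =>
    have hcnt : ∀ d : Int, ((x :: b).count d : Int)
        = (b.count d : Int) + (if d = x then (1 : Int) else 0) := by
      intro d
      by_cases hdx : d = x
      · simp [hdx]
      · simp [hdx, Ne.symm hdx]
    calc (da.map (fun d => (((x :: b).count d : Int)))).sum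
        = (da.map (fun d => (b.count d : Int) + (if d = x then (1 : Int) else 0))).sum := by
          simp only [hcnt]
      _ = (da.map (fun d => (b.count d : Int))).sum
            + (da.map (fun d => if d = x then (1 : Int) else 0)).sum := by
          rw [← List.sum_map_add]
      _ = (b.map (fun x => if da.contains x then (1 : Int) else 0)).sum
            + (if x ∈ da then 1 else 0) := by
          rw [ih, pv_sum_indicator da x h]
      _ = ((x :: b).map (fun x => if da.contains x then (1 : Int) else 0)).sum := by
          simp; ring

-- the counter dict built by B answers b.count
theorem pv_bc_getD (b : List Int) (v : Int) :
    (make_counter b).getD v 0 = (b.count v : Int) := by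
  unfold make_counter
  rw [PySem.Dict.getD_foldl_insert_add_one]
  simp [PySem.Dict.getD_empty]

-- ===== VERDICT =====
theorem august_answer_spec : Claim_equal_august_answer := by
  intro b a _
  unfold Spec_august_answer august_answer august_answer_alt
  simp only []
  have hc :
      (PySem.Set.ofList a).foldl
          (fun s d => s + (make_counter b).getD d 0) 0
        = b.foldl (fun c item => if a.contains item then c + 1 else c) 0 := by
    rw [pv_foldl_sum, pv_foldl_count]
    simp only [pv_bc_getD, zero_add]
    rw [pv_count_swap b (PySem.Set.ofList a) (PySem.Set.nodup_ofList a)]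
    simp [PySem.Set.mem_ofList]
  simp only [hc]
  split_ifs <;> first | rfl | omega
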